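-- pv_equiv track=rewrite | github.com/AymanElS4/Proyecto-LP-Analizador | codigo/JordanArchivos/semantico_jordan.py | is_compatible_type
-- ===== SOURCE A (Python) =====
-- def is_compatible_type(target_type, source_type):
--     compatible_pairs = [
--         ('Int', 'Int'),
--         ('Double', 'Double'),
--         ('String', 'String'),
--         ('Boolean', 'Boolean'),
--         ('Double', 'Int'),
--     ]
--
--     if target_type == source_type:
--         return True
--
--     for target, source in compatible_pairs:
--         if target_type == target and source_type == source:
--             return True
--
--     return False
-- ===== SOURCE B (Python) =====
-- # Numeric-widening-lattice formulation: the pair table is exactly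
-- # "identity, plus widening within the numeric chain Int < Double",
-- # so assignability = same type, or both numeric with rank(source) <= rank(target).
-- NUMERIC_RANK = {'Int': 1, 'Double': 2}
--
-- def is_compatible_type(target_type, source_type):
--     if target_type == source_type:
--         return True
--     rt = NUMERIC_RANK.get(target_type)
--     rs = NUMERIC_RANK.get(source_type)
--     return rt is not None and rs is not None and rs <= rt
-- ===== Notes on version B (the rewrite author's own statement) =====
-- stated objective: alternative
-- what changed: Replaced the pair-table scan with a numeric-widening-lattice judgement: types are assignable iff identical or both carry a numeric rank (Int=1 < Double=2) with rank(source) <= rank(target); no pair list exists and nothing is scanned.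
import Mathlib
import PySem

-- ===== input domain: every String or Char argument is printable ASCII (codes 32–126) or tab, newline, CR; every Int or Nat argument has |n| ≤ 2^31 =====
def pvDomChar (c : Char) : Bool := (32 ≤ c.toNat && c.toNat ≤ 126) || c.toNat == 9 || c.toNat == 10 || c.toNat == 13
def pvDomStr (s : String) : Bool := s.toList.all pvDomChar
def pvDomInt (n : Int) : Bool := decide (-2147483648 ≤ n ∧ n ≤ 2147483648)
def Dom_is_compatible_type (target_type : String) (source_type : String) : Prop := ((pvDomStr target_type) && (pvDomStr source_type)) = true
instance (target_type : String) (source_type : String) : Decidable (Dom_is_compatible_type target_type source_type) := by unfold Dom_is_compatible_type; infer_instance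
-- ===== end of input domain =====

-- B replaces A's pair-table scan with a numeric-rank lattice comparison (identity, or rank(source) ≤ rank(target) in Int<Double); objective: alternative.


-- ===== PORT A =====
-- Python's for-loop with early return over compatible_pairs, transcribed as structural recursion.
def pvScanPairs (target_type source_type : String) : List (String × String) → Bool
  | [] => false
  | (target, source) :: rest =>
      if target_type == target && source_type == source then true
      else pvScanPairs target_type source_type rest

def is_compatible_type (target_type : String) (source_type : String) : Bool :=
  let compatible_pairs : List (String × String) :=
    [("Int", "Int"), ("Double", "Double"), ("String", "String"),
     ("Boolean", "Boolean"), ("Double", "Int")]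
  if target_type == source_type then true
  else pvScanPairs target_type source_type compatible_pairs

-- ===== PORT B =====
-- B: numeric-widening lattice; two rank lookups in the dict {"Int": 1, "Double": 2}, no pair table.
def pvNumericRank : PySem.Dict String Int :=
  PySem.Dict.insert (PySem.Dict.insert PySem.Dict.empty "Int" 1) "Double" 2

def is_compatible_type_alt (target_type : String) (source_type : String) : Bool :=
  if target_type == source_type then true
  else
    let rt := PySem.Dict.get? pvNumericRank target_type
    let rs := PySem.Dict.get? pvNumericRank source_type
    match rt, rs with
    | some rt', some rs' => decide (rs' ≤ rt')
    | _, _ => false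

-- ===== PRECONDITION & SPEC =====
def Spec_is_compatible_type (target_type : String) (source_type : String) (out : Bool) : Prop := out = is_compatible_type_alt target_type source_type
instance (target_type : String) (source_type : String) (out : Bool) : Decidable (Spec_is_compatible_type target_type source_type out) := by unfold Spec_is_compatible_type; infer_instance

-- ===== CLAIM (what is proved, stated in full; the proofs are below) =====
def Claim_equal_is_compatible_type : Prop := ∀ (target_type : String) (source_type : String), Dom_is_compatible_type target_type source_type → Spec_is_compatible_type target_type source_type (is_compatible_type target_type source_type)

-- ===== LEMMAS AND PROOFS =====

-- ===== VERDICT (by name: the statement is the Claim_ definition above) =====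
theorem pvRank_get (s : String) :
    PySem.Dict.get? pvNumericRank s =
      if s = "Int" then some 1 else if s = "Double" then some 2 else none := by
  unfold pvNumericRank
  rw [PySem.Dict.get?_insert, PySem.Dict.get?_insert]
  by_cases h1 : s = "Int" <;> by_cases h2 : s = "Double" <;>
    simp_all [PySem.Dict.get?, PySem.Dict.empty]

theorem pvScan_eq (t s : String) (h : t ≠ s) :
    pvScanPairs t s
      [("Int", "Int"), ("Double", "Double"), ("String", "String"),
       ("Boolean", "Boolean"), ("Double", "Int")] =
      (t == "Double" && s == "Int") := by
  by_cases h1 : t = "Int" <;> by_cases h2 : t = "Double" <;>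
    by_cases h3 : t = "String" <;> by_cases h4 : t = "Boolean" <;>
    by_cases h5 : s = "Int" <;> by_cases h6 : s = "Double" <;>
    by_cases h7 : s = "String" <;> by_cases h8 : s = "Boolean" <;>
    simp_all [pvScanPairs]

theorem is_compatible_type_spec : Claim_equal_is_compatible_type := by
  intro t s _
  unfold Spec_is_compatible_type is_compatible_type is_compatible_type_alt
  by_cases h : t = s
  · simp [h]
  · simp only [beq_iff_eq, if_neg h, pvScan_eq t s h, pvRank_get]
    by_cases h1 : t = "Int" <;> by_cases h2 : t = "Double" <;>
      by_cases h3 : s = "Int" <;> by_cases h4 : s = "Double" <;>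
      simp_all
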